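-- pv_equiv track=rewrite | github.com/shoc71/Blackjack-py | beta/v1.py | replace_ace
-- ===== SOURCE A (Python) =====
-- def replace_ace(lst, old_value, new_value):
--     # output = [str(x) for x in lst]
--     found_11 = False
--     new_list = []
--     for x in lst:
--         if x == old_value and not found_11:
--             new_list.append(new_value)
--             found_11 = True
--         elif x == old_value and found_11:
--             new_list.append(1)  # Convert the second instance of 11 to 1
--         else:
--             new_list.append(x)
--     return new_list
-- ===== SOURCE B (Python) =====
-- def replace_ace(lst, old_value, new_value):
--     try:
--         i = lst.index(old_value)
--     except ValueError:
--         return list(lst)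
--     return list(lst[:i]) + [new_value] + [1 if x == old_value else x for x in lst[i+1:]]
-- ===== Notes on version B (the rewrite author's own statement) =====
-- stated objective: alternative
-- what changed: Replaces the flag-driven single pass with a locate step (list.index in try/except) plus prefix + replaced head + a mapped suffix, eliminating the found_11 boolean state.
import Mathlib
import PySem

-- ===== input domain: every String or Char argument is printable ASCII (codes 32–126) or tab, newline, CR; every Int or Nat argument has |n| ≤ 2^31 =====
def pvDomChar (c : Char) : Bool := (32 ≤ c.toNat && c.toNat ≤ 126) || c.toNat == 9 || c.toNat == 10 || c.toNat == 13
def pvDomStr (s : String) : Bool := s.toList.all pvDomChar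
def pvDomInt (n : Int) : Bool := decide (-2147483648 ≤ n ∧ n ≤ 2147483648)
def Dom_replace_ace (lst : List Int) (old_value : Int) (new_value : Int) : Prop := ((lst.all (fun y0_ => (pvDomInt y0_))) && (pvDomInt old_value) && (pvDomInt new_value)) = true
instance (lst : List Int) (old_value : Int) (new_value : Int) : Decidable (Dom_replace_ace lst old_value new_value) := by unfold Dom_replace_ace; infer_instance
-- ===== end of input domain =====

-- ===== PORT A =====
-- Header: B locates the first occurrence once, then builds prefix + new head + mapped suffix
-- (alternative decomposition, same cost); A is a flag-driven single pass.
-- loop of A: structural recursion over the remaining list with the found_11 flag as state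
def replaceAceLoop (old_value new_value : Int) (found_11 : Bool) : List Int → List Int
  | [] => []
  | x :: xs =>
    if x = old_value ∧ found_11 = false then new_value :: replaceAceLoop old_value new_value true xs
    else if x = old_value ∧ found_11 = true then 1 :: replaceAceLoop old_value new_value found_11 xs
    else x :: replaceAceLoop old_value new_value found_11 xs

def replace_ace (lst : List Int) (old_value : Int) (new_value : Int) : List Int :=
  replaceAceLoop old_value new_value false lst

-- ===== PORT B =====
def replace_ace_alt (lst : List Int) (old_value : Int) (new_value : Int) : List Int :=
  match PySem.List.index? lst old_value with
  | none => lst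
  | some i =>
    PySem.List.slice lst none (some (Int.ofNat i)) ++ [new_value] ++
      (PySem.List.slice lst (some (Int.ofNat (i+1))) none).map
        (fun x => if x = old_value then 1 else x)

-- ===== PRECONDITION & SPEC =====
def Spec_replace_ace (lst : List Int) (old_value : Int) (new_value : Int) (out : List Int) : Prop := out = replace_ace_alt lst old_value new_value
instance (lst : List Int) (old_value : Int) (new_value : Int) (out : List Int) : Decidable (Spec_replace_ace lst old_value new_value out) := by unfold Spec_replace_ace; infer_instance

-- ===== CLAIM (what is proved, stated in full; the proofs are below) =====
def Claim_equal_replace_ace : Prop := ∀ (lst : List Int) (old_value : Int) (new_value : Int), Dom_replace_ace lst old_value new_value → Spec_replace_ace lst old_value new_value (replace_ace lst old_value new_value)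

-- ===== LEMMAS AND PROOFS =====

-- after the first replacement the loop maps every later old_value to 1
theorem replaceAceLoop_true (o v : Int) (xs : List Int) :
    replaceAceLoop o v true xs = xs.map (fun x => if x = o then 1 else x) := by
  induction xs with
  | nil => rfl
  | cons x xs ih =>
    by_cases h : x = o <;> simp [replaceAceLoop, h, ih]

theorem replaceAceLoop_false (o v : Int) (xs : List Int) :
    replaceAceLoop o v false xs = replace_ace_alt xs o v := by
  induction xs with
  | nil => rfl
  | cons x xs ih =>
    by_cases h : x = o
    · subst h
      rw [replace_ace_alt, PySem.List.index?_cons_self]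
      show replaceAceLoop x v false (x :: xs)
        = PySem.List.slice (x :: xs) none (some (Int.ofNat 0)) ++ [v] ++
            (PySem.List.slice (x :: xs) (some (Int.ofNat (0+1))) none).map
              (fun y => if y = x then 1 else y)
      rw [PySem.List.slice_to (x :: xs) (by norm_num : (0:Int) ≤ Int.ofNat 0),
        show Int.ofNat (0+1) = (1:Int) from rfl, PySem.List.slice_from_one]
      simp [replaceAceLoop, replaceAceLoop_true]
    · rw [replace_ace_alt, PySem.List.index?_cons_of_ne xs h]
      have hstep : replaceAceLoop o v false (x :: xs) = x :: replaceAceLoop o v false xs := by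
        simp [replaceAceLoop, h]
      cases hi : PySem.List.index? xs o with
      | none =>
        rw [hstep, ih]
        simp only [PySem.List.index?_eq_idxOf?] at hi
        simp [replace_ace_alt, hi]
      | some i =>
        rw [hstep, ih]
        simp only [replace_ace_alt, hi, Option.map_some, Int.ofNat_eq_natCast]
        rw [PySem.List.slice_to xs (Int.natCast_nonneg i),
          PySem.List.slice_from xs (Int.natCast_nonneg (i+1)),
          PySem.List.slice_to (x :: xs) (Int.natCast_nonneg (i+1)),
          PySem.List.slice_from (x :: xs) (Int.natCast_nonneg (i+1+1))]
        have ht : ((i:Int) + 1 + 1).toNat = i + 1 + 1 := by omega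
        simp [ht]

-- ===== VERDICT (by name: the statement is the Claim_ definition above) =====
theorem replace_ace_spec : Claim_equal_replace_ace := by
  intro lst o v _
  unfold Spec_replace_ace replace_ace
  exact replaceAceLoop_false o v lst
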